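-- pv_equiv track=rewrite | github.com/Open-PNT/NavToolkit | util/buildkit/parsing.py | indent_of
-- ===== SOURCE A (Python) =====
-- def indent_of(code):
--     r'''
--     Return a string that matches the leading indentation of a given
--     piece of code, defined as the leading whitespace common to all
--     lines in the code.
--
--     >>> indent_of('\tif (x) {\n\t\treturn;\n\t}')
--     '\t'
--     '''
--     shortest = None
--     for line in code.split("\n"):
--         indent = ''
--         for char in line:
--             if char in "\t ":
--                 indent += char
--             elif shortest is None or len(indent) < len(shortest):
--                 shortest = indent
--                 break
--     return shortest or ''
-- ===== SOURCE B (Python) =====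
-- def indent_of(code):
--     indents = []
--     for line in code.split("\n"):
--         stripped = line.lstrip("\t ")
--         if stripped:
--             indents.append(line[:len(line) - len(stripped)])
--     return min(indents, key=len) if indents else ''
-- ===== Notes on version B (the rewrite author's own statement) =====
-- stated objective: simpler
-- what changed: Replaces A's char-by-char inner loop with running-minimum state by a two-phase decomposition: collect each non-blank line's leading tab/space prefix via lstrip, then take min(indents, key=len).
import Mathlib
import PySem

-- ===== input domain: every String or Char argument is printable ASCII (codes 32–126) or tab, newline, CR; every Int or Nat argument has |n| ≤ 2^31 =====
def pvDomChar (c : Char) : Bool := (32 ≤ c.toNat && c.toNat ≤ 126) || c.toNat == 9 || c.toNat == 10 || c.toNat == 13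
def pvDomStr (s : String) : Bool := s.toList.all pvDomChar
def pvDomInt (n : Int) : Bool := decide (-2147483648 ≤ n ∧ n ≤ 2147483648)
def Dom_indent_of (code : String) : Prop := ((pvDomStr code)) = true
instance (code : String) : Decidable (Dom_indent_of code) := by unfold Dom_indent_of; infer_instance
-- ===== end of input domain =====

-- B collects each non-blank line's leading-whitespace prefix (lstrip) and takes min by length,
-- instead of A's char-by-char running-minimum loop; objective: simpler decomposition, same cost.

-- ===== PORT A =====
-- inner 'for char in line' loop of A: arguments = (rest of line, indent built so far, shortest);
-- 'break' is modelled by returning immediately with the updated shortest.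
def pvAinner : List Char → List Char → Option (List Char) → Option (List Char)
  | [], _, shortest => shortest
  | c :: rest, indent, shortest =>
    if c = '\t' ∨ c = ' ' then
      pvAinner rest (indent ++ [c]) shortest
    else if shortest.isNone || indent.length < (shortest.getD []).length then
      some indent
    else
      pvAinner rest indent shortest

def indent_of (code : String) : String :=
  let shortest :=
    (PySem.Chars.splitOn code.toList ['\n']).foldl (fun sh line => pvAinner line [] sh) none
  String.ofList (shortest.getD [])   -- 'shortest or ""': None and '' both give ''

-- ===== PORT B =====
-- membership in "\t " (the chars argument of lstrip)
def pvWsB (c : Char) : Bool := decide (c = '\t' ∨ c = ' ')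

def indent_of_alt (code : String) : String :=
  let lines := PySem.Chars.splitOn code.toList ['\n']
  let indents := lines.filterMap (fun line =>
    -- line.lstrip("\t ") : drop the leading chars that are in "\t " — exact
    let stripped := line.dropWhile pvWsB
    if stripped ≠ [] then some (line.take (line.length - stripped.length)) else none)
  match PySem.List.min? indents (fun l => PySem.List.len l) with
  | some m => String.ofList m
  | none => ""

-- ===== PRECONDITION & SPEC =====
def Spec_indent_of (code : String) (out : String) : Prop := out = indent_of_alt code
instance (code : String) (out : String) : Decidable (Spec_indent_of code out) := by unfold Spec_indent_of; infer_instance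

-- ===== CLAIM (what is proved, stated in full; the proofs are below) =====
def Claim_equal_indent_of : Prop := ∀ (code : String), Dom_indent_of code → Spec_indent_of code (indent_of code)

-- ===== LEMMAS AND PROOFS =====

-- once shortest is set and no shorter than the running indent, the rest of the line changes nothing
theorem pvAinner_stuck (line : List Char) : ∀ (indent s : List Char),
    s.length ≤ indent.length → pvAinner line indent (some s) = some s := by
  induction line with
  | nil => intro indent s h; simp [pvAinner]
  | cons c rest ih =>
    intro indent s h
    by_cases hc : c = '\t' ∨ c = ' '
    · simp only [pvAinner, if_pos hc]
      exact ih (indent ++ [c]) s (by rw [List.length_append]; omega)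
    · simp only [pvAinner, if_neg hc, Option.isNone_some, Bool.false_or, Option.getD_some]
      rw [if_neg (by simp only [decide_eq_true_eq]; omega)]
      exact ih indent s h

def pvUpd (sh : Option (List Char)) (p : List Char) : Option (List Char) :=
  if sh.isNone || p.length < (sh.getD []).length then some p else sh

-- characterisation of A's inner loop: blank lines do nothing, others update shortest once
theorem pvAinner_eq (line : List Char) : ∀ (indent : List Char) (sh : Option (List Char)),
    pvAinner line indent sh =
      if line.dropWhile pvWsB = [] then sh
      else pvUpd sh (indent ++ line.takeWhile pvWsB) := by
  induction line with
  | nil => intro indent sh; simp [pvAinner]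
  | cons c rest ih =>
    intro indent sh
    by_cases hc : c = '\t' ∨ c = ' '
    · have hp : pvWsB c = true := decide_eq_true hc
      rw [show pvAinner (c :: rest) indent sh = pvAinner rest (indent ++ [c]) sh from by
        simp [pvAinner, hc], ih]
      rw [List.dropWhile_cons, List.takeWhile_cons, hp]
      simp only [if_true, List.append_assoc, List.singleton_append]
    · have hp : pvWsB c = false := decide_eq_false hc
      rw [List.dropWhile_cons, List.takeWhile_cons, hp]
      simp only [Bool.false_eq_true, if_false]
      rw [if_neg (by simp)]
      simp only [pvAinner, if_neg hc, List.append_nil]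
      rcases sh with _ | s
      · simp [pvUpd]
      · simp only [Option.isNone_some, Bool.false_or, Option.getD_some]
        by_cases hlt : indent.length < s.length
        · rw [if_pos (by simpa using hlt)]
          simp [pvUpd, hlt]
        · rw [if_neg (by simpa using hlt)]
          rw [pvAinner_stuck rest indent s (by omega)]
          simp [pvUpd, hlt]

-- B's slice line[:len(line)-len(stripped)] is exactly the takeWhile prefix
theorem pvTake_eq_takeWhile (line : List Char) (p : Char → Bool) :
    line.take (line.length - (line.dropWhile p).length) = line.takeWhile p := by
  have hlen : line.length = (line.takeWhile p).length + (line.dropWhile p).length := by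
    conv_lhs => rw [← List.takeWhile_append_dropWhile (p := p) (l := line)]
    rw [List.length_append]
  have h : line.length - (line.dropWhile p).length = (line.takeWhile p).length := by omega
  rw [h]
  exact (List.prefix_iff_eq_take.mp (List.takeWhile_prefix p)).symm

-- Python's min(key=len) over the collected prefixes equals A's line-by-line running fold
theorem pvFold_eq_min (lines : List (List Char)) : ∀ (sh : Option (List Char)),
    lines.foldl (fun sh line => pvAinner line [] sh) sh =
      (lines.filterMap (fun line =>
        let stripped := line.dropWhile pvWsB
        if stripped ≠ [] then some (line.take (line.length - stripped.length)) else none)).foldl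
        (fun acc x =>
          match acc with
          | none => some x
          | some m => if PySem.List.len x < PySem.List.len m then some x else some m) sh := by
  induction lines with
  | nil => intro sh; simp
  | cons line rest ih =>
    intro sh
    rw [List.foldl_cons, pvAinner_eq]
    by_cases hb : line.dropWhile pvWsB = []
    · rw [if_pos hb, List.filterMap_cons_none (by simp [hb]), ih]
    · rw [if_neg hb,
        List.filterMap_cons_some (show _ = some (line.takeWhile pvWsB) by
          simp only [pvTake_eq_takeWhile, hb, ne_eq, not_false_eq_true, if_true]),
        List.foldl_cons, ih]
      congr 1
      rcases sh with _ | m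
      · simp [pvUpd]
      · show pvUpd (some m) ([] ++ line.takeWhile pvWsB) =
          if PySem.List.len (line.takeWhile pvWsB) < PySem.List.len m
          then some (line.takeWhile pvWsB) else some m
        simp only [pvUpd, List.nil_append, Option.isNone_some, Bool.false_or, Option.getD_some,
          PySem.List.len_eq]
        by_cases hlt : (line.takeWhile pvWsB).length < m.length
        · rw [if_pos (by simpa using hlt), if_pos (by exact_mod_cast hlt)]
        · rw [if_neg (by simpa using hlt), if_neg (by exact_mod_cast hlt)]

theorem pvMatch_getD (o : Option (List Char)) :
    (match o with | some m => String.ofList m | none => "") = String.ofList (o.getD []) := by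
  rcases o with _ | m <;> rfl

theorem pvFinal (xs : List (List Char)) :
    String.ofList ((xs.foldl
        (fun acc x =>
          match acc with
          | none => some x
          | some m => if PySem.List.len x < PySem.List.len m then some x else some m) none).getD []) =
      match PySem.List.min? xs (fun l => PySem.List.len l) with
      | some m => String.ofList m
      | none => "" := by
  rw [pvMatch_getD]
  congr 2
  rw [PySem.List.min?]
  exact (List.foldl_ext _ _ none fun acc x _ => by rcases acc with _ | m <;> rfl).symm

-- ===== VERDICT (by name: the statement is the Claim_ definition above) =====
theorem indent_of_spec : Claim_equal_indent_of := by
  intro code _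
  show indent_of code = indent_of_alt code
  unfold indent_of indent_of_alt
  rw [pvFold_eq_min]
  exact pvFinal _
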